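-- pv_equiv track=rewrite | github.com/mtalvik/automatiseerimine_ext | scripts/fix_orphan_backticks.py | fix_orphan_backticks
-- ===== SOURCE A (Python) =====
-- def fix_orphan_backticks(content):
--     """Fix lines where closing backtick is on the next line"""
--     lines = content.split('\n')
--     i = 0
--     fixed_lines = []
--     changes = 0
--
--     while i < len(lines):
--         # Check if next line is just a single backtick
--         if i + 1 < len(lines) and lines[i+1].strip() == '`':
--             current_line = lines[i].rstrip()
--             # Check if current line contains an opening backtick but no closing one at the end
--             # Count backticks
--             backtick_count = current_line.count('`')
--             if backtick_count % 2 == 1:  # Odd number means unclosed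
--                 # Move the closing backtick from next line to end of current line
--                 fixed_lines.append(current_line + '`')
--                 changes += 1
--                 i += 2  # Skip both lines
--                 continue
--
--         fixed_lines.append(lines[i])
--         i += 1
--
--     return '\n'.join(fixed_lines), changes
-- ===== SOURCE B (Python) =====
-- def fix_orphan_backticks(content):
--     """Fix lines where closing backtick is on the next line"""
--     lines = content.split('\n')
--     # pass 1: mark every line whose successor is a lone backtick and whose
--     # own backtick count is odd (a merge *candidate*)
--     cond = [nxt.strip() == '`' and cur.count('`') % 2 == 1
--             for cur, nxt in zip(lines, lines[1:])] + [False]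
--     # pass 2: greedy selection over the candidate mask — a merged line
--     # consumes its successor, so two adjacent candidates cannot both fire
--     merged = []
--     prev = False
--     for c in cond:
--         m = c and not prev
--         merged.append(m)
--         prev = m
--     # pass 3: rebuild from lines + the final mask
--     out = [ln.rstrip() + '`' if m else ln
--            for ln, m, pm in zip(lines, merged, [False] + merged)
--            if m or not pm]
--     return '\n'.join(out), sum(merged)
-- ===== Notes on version B (the rewrite author's own statement) =====
-- stated objective: alternative
-- what changed: Replaced A's single online while-loop with lookahead and i+=2 skipping by three staged passes: first a zip-built boolean mask of merge candidates, then a greedy scan that forbids adjacent selections (a merged line consumes its successor), then a rebuild via a filtered comprehension over lines zipped with the mask and its shift.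
import Mathlib
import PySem

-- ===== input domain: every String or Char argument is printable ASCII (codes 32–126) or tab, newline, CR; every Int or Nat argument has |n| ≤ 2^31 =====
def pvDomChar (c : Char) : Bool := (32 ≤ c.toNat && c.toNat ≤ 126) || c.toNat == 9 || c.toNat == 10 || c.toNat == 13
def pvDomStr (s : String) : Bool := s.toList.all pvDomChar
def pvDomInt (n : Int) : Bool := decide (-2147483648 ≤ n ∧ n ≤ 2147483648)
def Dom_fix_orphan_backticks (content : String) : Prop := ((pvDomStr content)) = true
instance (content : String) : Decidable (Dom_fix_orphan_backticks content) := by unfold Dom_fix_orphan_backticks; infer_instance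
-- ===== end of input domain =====

-- B replaces A's online while loop (lookahead + i+=2 skip) by three staged passes:
-- a candidate mask, a greedy no-adjacent selection scan, and a zip/filter rebuild; same cost.

-- ===== PORT A =====
-- while i < len(lines): lookahead at lines[i+1], merge and skip two, else append and advance
def fixLoopA : List (List Char) → List (List Char) × Int
  | [] => ([], 0)
  | [x] => ([x], 0)
  | x :: y :: rest' =>
    if (PySem.Chars.strip y == ['`']) &&
       (PySem.Chars.count (PySem.Chars.rstrip x) ['`'] % 2 == 1) then
      let r := fixLoopA rest'
      ((PySem.Chars.rstrip x ++ ['`']) :: r.1, r.2 + 1)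
    else
      let r := fixLoopA (y :: rest')
      (x :: r.1, r.2)
termination_by l => l.length
decreasing_by all_goals simp

def fix_orphan_backticks (content : String) : String × Int :=
  let r := fixLoopA (PySem.Chars.splitOn content.toList ['\n'])
  (String.ofList (PySem.Chars.join ['\n'] r.1), r.2)

-- ===== PORT B =====
-- cond entry for a (cur, nxt) pair of zip(lines, lines[1:])
def condB (cur nxt : List Char) : Bool :=
  (PySem.Chars.strip nxt == ['`']) && (PySem.Chars.count cur ['`'] % 2 == 1)

def fix_orphan_backticks_alt (content : String) : String × Int :=
  let lines := PySem.Chars.splitOn content.toList ['\n']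
  -- pass 1: candidate mask via zip(lines, lines[1:]) + [False]
  let cond := (List.zipWith condB lines lines.tail) ++ [false]
  -- pass 2: greedy scan (merged.append(m); prev = m)
  let mp := cond.foldl (fun (acc : List Bool × Bool) c =>
      (acc.1 ++ [c && !acc.2], c && !acc.2)) ([], false)
  let merged := mp.1
  -- pass 3: rebuild from zip(lines, merged, [False] + merged)
  let triples := lines.zip (merged.zip (false :: merged))
  let out := (triples.filter (fun t => t.2.1 || !t.2.2)).map
      (fun t => if t.2.1 then PySem.Chars.rstrip t.1 ++ ['`'] else t.1)
  (String.ofList (PySem.Chars.join ['\n'] out),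
   merged.foldl (fun s m => s + (if m then (1 : Int) else 0)) 0)

-- ===== PRECONDITION & SPEC =====
def Spec_fix_orphan_backticks (content : String) (out : String × Int) : Prop := out = fix_orphan_backticks_alt content
instance (content : String) (out : String × Int) : Decidable (Spec_fix_orphan_backticks content out) := by unfold Spec_fix_orphan_backticks; infer_instance

-- ===== CLAIM (what is proved, stated in full; the proofs are below) =====
def Claim_equal_fix_orphan_backticks : Prop := ∀ (content : String), Dom_fix_orphan_backticks content → Spec_fix_orphan_backticks content (fix_orphan_backticks content)

-- ===== LEMMAS AND PROOFS =====

theorem count_go_singleton (c : Char) (l : List Char) : ∀ (fuel acc : Nat), l.length ≤ fuel →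
    PySem.Chars.count.go [c] fuel l acc = acc + l.count c := by
  induction l with
  | nil => intro fuel acc _; cases fuel <;> simp [PySem.Chars.count.go]
  | cons h t ih =>
    intro fuel acc hf
    cases fuel with
    | zero => simp at hf
    | succ f =>
      simp only [PySem.Chars.count.go, List.isPrefixOf]
      simp only [List.length_cons] at hf
      by_cases hc : (c == h) = true
      · simp only [hc, Bool.true_and, if_pos, List.length_cons, List.drop_succ_cons, List.length_nil, List.drop_zero]
        rw [ih f (acc+1) (by omega)]
        have : (h == c) = true := by simp at hc ⊢; exact hc.symm
        simp [List.count_cons, this]; omega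
      · simp only [hc, Bool.false_and, if_neg, Bool.false_eq_true, not_false_eq_true]
        rw [ih f acc (by omega)]
        have : (h == c) = false := by simp at hc ⊢; exact fun e => hc e.symm
        simp [List.count_cons, this]

theorem chars_count_singleton (l : List Char) (c : Char) :
    PySem.Chars.count l [c] = l.count c := by
  simp [PySem.Chars.count, count_go_singleton c l l.length 0 (le_refl _)]

theorem count_rstrip_backtick (l : List Char) :
    (PySem.Chars.rstrip l).count '`' = l.count '`' := by
  unfold PySem.Chars.rstrip
  rw [List.count_reverse]
  conv_rhs => rw [← List.count_reverse (l := l)]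
  conv_rhs => rw [← List.takeWhile_append_dropWhile (p := PySem.Chars.isspace) (l := l.reverse)]
  rw [List.count_append]
  have h0 : (List.takeWhile PySem.Chars.isspace l.reverse).count '`' = 0 := by
    rw [List.count_eq_zero]
    intro h
    have := List.mem_takeWhile_imp h
    simp [PySem.Chars.isspace] at this
  omega

-- condB equals A's condition (rstrip does not change the backtick count)
theorem condB_eq_A (x y : List Char) :
    condB x y = ((PySem.Chars.strip y == ['`']) &&
       (PySem.Chars.count (PySem.Chars.rstrip x) ['`'] % 2 == 1)) := by
  simp [condB, chars_count_singleton, count_rstrip_backtick]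

-- recursive forms of B's three passes, used only by the proof
def condList (lines : List (List Char)) : List Bool :=
  (List.zipWith condB lines lines.tail) ++ [false]

def mergedGo : List Bool → Bool → List Bool
  | [], _ => []
  | c :: cs, prev => (c && !prev) :: mergedGo cs (c && !prev)

def outOf : List (List Char) → List Bool → Bool → List (List Char)
  | [], _, _ => []
  | _ :: _, [], _ => []
  | l :: ls, m :: ms, pm =>
    if m || !pm then (if m then PySem.Chars.rstrip l ++ ['`'] else l) :: outOf ls ms m
    else outOf ls ms m

def isum : List Bool → Int
  | [] => 0
  | m :: ms => (if m then 1 else 0) + isum ms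

theorem merged_foldl (cond : List Bool) : ∀ (acc : List Bool) (prev : Bool),
    (cond.foldl (fun (a : List Bool × Bool) c => (a.1 ++ [c && !a.2], c && !a.2)) (acc, prev)).1
      = acc ++ mergedGo cond prev := by
  induction cond with
  | nil => intro acc prev; simp [mergedGo]
  | cons c cs ih => intro acc prev; simp [mergedGo, ih]

theorem sum_foldl (ms : List Bool) : ∀ (s : Int),
    ms.foldl (fun s m => s + (if m then (1 : Int) else 0)) s = s + isum ms := by
  induction ms with
  | nil => intro s; simp [isum]
  | cons m t ih => intro s; simp [isum, ih]; ring

theorem zip_filter_map (lines : List (List Char)) : ∀ (merged : List Bool) (pm : Bool),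
    ((lines.zip (merged.zip (pm :: merged))).filter (fun t => t.2.1 || !t.2.2)).map
        (fun t => if t.2.1 then PySem.Chars.rstrip t.1 ++ ['`'] else t.1)
      = outOf lines merged pm := by
  induction lines with
  | nil => intro merged pm; simp [outOf]
  | cons l ls ih =>
    intro merged pm
    cases merged with
    | nil => simp [outOf]
    | cons m ms =>
      simp only [List.zip_cons_cons, outOf]
      by_cases h : (m || !pm) = true
      · rw [List.filter_cons_of_pos (by simpa using h), List.map_cons, ih, if_pos h]
      · rw [List.filter_cons_of_neg (by simpa using h), ih, if_neg h]

theorem condList_cons (x y : List Char) (r : List (List Char)) :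
    condList (x :: y :: r) = condB x y :: condList (y :: r) := by
  simp [condList]

-- the core correspondence: B's staged passes compute exactly A's loop result
theorem main_eq (lines : List (List Char)) :
    outOf lines (mergedGo (condList lines) false) false = (fixLoopA lines).1 ∧
    isum (mergedGo (condList lines) false) = (fixLoopA lines).2 := by
  induction lines using fixLoopA.induct with
  | case1 => simp [condList, mergedGo, outOf, isum, fixLoopA]
  | case2 x => simp [condList, mergedGo, outOf, isum, fixLoopA]
  | case3 x y rest' hcond ih =>
    have hc : condB x y = true := by rw [condB_eq_A]; exact hcond
    rw [condList_cons]
    cases rest' with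
    | nil =>
      simp [fixLoopA, hcond, condList, mergedGo, hc, outOf, isum]
    | cons z r =>
      rw [condList_cons]
      simp only [mergedGo, hc, Bool.not_false, Bool.and_true, Bool.true_and,
        Bool.not_true, Bool.and_false]
      simp only [outOf, Bool.true_or, if_pos, if_true, Bool.false_or, Bool.not_true,
        Bool.false_and]
      simp only [fixLoopA, if_pos hcond]
      refine ⟨?_, ?_⟩
      · simp [outOf, ih.1]
      · simp only [isum, ih.2]; norm_num; exact add_comm 1 _
  | case4 x y rest' hcond ih =>
    have hc : condB x y = false := by rw [condB_eq_A]; simpa using hcond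
    rw [condList_cons]
    simp only [mergedGo, hc, Bool.false_and, Bool.not_false]
    simp only [outOf, Bool.false_or, Bool.not_false, if_true, if_false]
    simp only [fixLoopA, if_neg hcond]
    refine ⟨?_, ?_⟩
    · simp [ih.1]
    · simp [isum, ih.2]

-- ===== VERDICT (by name: the statement is the Claim_ definition above) =====
theorem fix_orphan_backticks_spec : Claim_equal_fix_orphan_backticks := by
  intro content _
  unfold Spec_fix_orphan_backticks fix_orphan_backticks fix_orphan_backticks_alt
  simp only [merged_foldl, List.nil_append, sum_foldl, zip_filter_map]
  rw [show (List.zipWith condB (PySem.Chars.splitOn content.toList ['\n'])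
      (PySem.Chars.splitOn content.toList ['\n']).tail) ++ [false]
      = condList (PySem.Chars.splitOn content.toList ['\n']) from rfl]
  have h := main_eq (PySem.Chars.splitOn content.toList ['\n'])
  rw [h.1, h.2]
  simp
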